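-- pv_equiv track=rewrite | github.com/gautamTheGreat/madhu-archive | pipeline/enrich_posts.py | filter_valid_posts
-- ===== SOURCE A (Python) =====
-- def filter_valid_posts(posts: list) -> tuple:
--     valid_posts = []
--     stats = {'original_count': len(posts), 'excluded_no_media': 0, 'excluded_video': 0}
--     for p in posts:
--         media = p.get('media')
--         if not media or len(media) == 0:
--             stats['excluded_no_media'] += 1
--             continue
--         if any(m.get('type') == 'video' for m in media):
--             stats['excluded_video'] += 1
--             continue
--         valid_posts.append(p)
--     return valid_posts, stats
-- ===== SOURCE B (Python) =====
-- def filter_valid_posts(posts: list) -> tuple: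
--     valid_posts = [p for p in posts
--                    if p.get('media')
--                    and not any(m.get('type') == 'video' for m in p['media'])]
--     excluded_no_media = sum(1 for p in posts if not p.get('media'))
--     stats = {
--         'original_count': len(posts),
--         'excluded_no_media': excluded_no_media,
--         'excluded_video': len(posts) - excluded_no_media - len(valid_posts),
--     }
--     return valid_posts, stats
-- ===== Notes on version B (the rewrite author's own statement) =====
-- stated objective: simpler
-- what changed: Replaces the single accumulating loop with a filter comprehension for the valid posts plus an independent count of media-less posts, deriving the video-excluded count arithmetically as len(posts) - excluded_no_media - len(valid_posts).
import Mathlib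
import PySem

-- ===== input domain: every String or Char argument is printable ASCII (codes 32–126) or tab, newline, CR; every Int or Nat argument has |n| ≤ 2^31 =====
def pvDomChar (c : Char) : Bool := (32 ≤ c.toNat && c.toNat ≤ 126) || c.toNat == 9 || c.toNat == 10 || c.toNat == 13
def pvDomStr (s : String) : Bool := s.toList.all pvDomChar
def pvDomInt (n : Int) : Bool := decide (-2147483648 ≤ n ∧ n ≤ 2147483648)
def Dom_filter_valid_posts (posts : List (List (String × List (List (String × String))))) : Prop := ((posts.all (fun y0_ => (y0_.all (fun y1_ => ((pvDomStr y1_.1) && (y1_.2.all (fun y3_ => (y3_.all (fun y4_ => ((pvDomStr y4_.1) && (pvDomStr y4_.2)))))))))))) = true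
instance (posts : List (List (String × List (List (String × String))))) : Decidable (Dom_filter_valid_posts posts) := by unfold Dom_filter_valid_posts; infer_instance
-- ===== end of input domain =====

-- B: valid posts via one filter pass plus an independent count of media-less posts;
-- the video-excluded count is derived arithmetically (simpler decomposition, same cost).


-- ===== PORT A =====
-- m.get('type') == 'video'
def pvIsVideoA (m : List (String × String)) : Bool :=
  (PySem.Dict.mk m).get? "type" == some "video"

-- the loop body: 'not media or len(media) == 0' on an Optional list is 'getD [] = []'
def pvStepA (acc : (List (List (String × List (List (String × String))))) × PySem.Dict String Int)
    (p : List (String × List (List (String × String)))) :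
    (List (List (String × List (List (String × String))))) × PySem.Dict String Int :=
  let media := (PySem.Dict.mk p).get? "media"
  if media.getD [] = [] then
    (acc.1, acc.2.modify "excluded_no_media" 0 (· + 1))
  else if (media.getD []).any pvIsVideoA then
    (acc.1, acc.2.modify "excluded_video" 0 (· + 1))
  else
    (acc.1 ++ [p], acc.2)

def filter_valid_posts (posts : List (List (String × List (List (String × String))))) : (List (List (String × List (List (String × String))))) × (List (String × Int)) :=
  let stats : PySem.Dict String Int :=
    ((PySem.Dict.empty.insert "original_count" (posts.length : Int)).insert
        "excluded_no_media" 0).insert "excluded_video" 0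
  let r := posts.foldl pvStepA ([], stats)
  (r.1, r.2.items)

-- ===== PORT B =====
-- not p.get('media')
def pvNoMediaB (p : List (String × List (List (String × String)))) : Bool :=
  ((PySem.Dict.mk p).get? "media").getD [] = []

-- p.get('media') and not any(m.get('type') == 'video' for m in p['media'])
def pvValidB (p : List (String × List (List (String × String)))) : Bool :=
  !pvNoMediaB p &&
    !(((PySem.Dict.mk p).get? "media").getD []).any
      (fun m => (PySem.Dict.mk m).get? "type" == some "video")

def filter_valid_posts_alt (posts : List (List (String × List (List (String × String))))) : (List (List (String × List (List (String × String))))) × (List (String × Int)) :=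
  let valid := posts.filter pvValidB
  let noMedia : Int := (posts.map (fun p => if pvNoMediaB p then (1 : Int) else 0)).sum
  (valid,
    [("original_count", (posts.length : Int)),
     ("excluded_no_media", noMedia),
     ("excluded_video", (posts.length : Int) - noMedia - (valid.length : Int))])

-- ===== PRECONDITION & SPEC =====
def Spec_filter_valid_posts (posts : List (List (String × List (List (String × String))))) (out : (List (List (String × List (List (String × String))))) × (List (String × Int))) : Prop := out = filter_valid_posts_alt posts
instance (posts : List (List (String × List (List (String × String))))) (out : (List (List (String × List (List (String × String))))) × (List (String × Int))) : Decidable (Spec_filter_valid_posts posts out) := by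
  unfold Spec_filter_valid_posts
  letI h2 : DecidableEq (String × List (List (String × String))) := instDecidableEqProd
  letI h3 : DecidableEq (List (String × List (List (String × String)))) := instDecidableEqList
  letI h4 : DecidableEq (List (List (String × List (List (String × String))))) := instDecidableEqList
  infer_instance

-- ===== CLAIM (what is proved, stated in full; the proofs are below) =====
def Claim_equal_filter_valid_posts : Prop := ∀ (posts : List (List (String × List (List (String × String))))), Dom_filter_valid_posts posts → Spec_filter_valid_posts posts (filter_valid_posts posts)

-- ===== LEMMAS AND PROOFS =====
def pvBase (n a b : Int) : PySem.Dict String Int :=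
  ((PySem.Dict.empty.insert "original_count" n).insert "excluded_no_media" a).insert "excluded_video" b

lemma pvBase_mod_nm (n a b : Int) :
    (pvBase n a b).modify "excluded_no_media" 0 (· + 1) = pvBase n (a + 1) b := rfl

lemma pvBase_mod_nv (n a b : Int) :
    (pvBase n a b).modify "excluded_video" 0 (· + 1) = pvBase n a (b + 1) := rfl

def pvVidCnt (p : List (String × List (List (String × String)))) : Bool :=
  !pvNoMediaB p && (((PySem.Dict.mk p).get? "media").getD []).any pvIsVideoA

lemma pvLoopA (posts : List (List (String × List (List (String × String)))))
    (v : List (List (String × List (List (String × String))))) (n a b : Int) :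
    posts.foldl pvStepA (v, pvBase n a b) =
      (v ++ posts.filter pvValidB,
       pvBase n (a + (posts.map (fun p => if pvNoMediaB p then (1 : Int) else 0)).sum)
                (b + (posts.map (fun p => if pvVidCnt p then (1 : Int) else 0)).sum)) := by
  induction posts generalizing v a b with
  | nil => simp [pvBase]
  | cons p ps ih =>
    simp only [List.foldl_cons, List.map_cons, List.sum_cons, List.filter_cons]
    by_cases hnm : pvNoMediaB p
    · have h1 : pvStepA (v, pvBase n a b) p = (v, pvBase n (a + 1) b) := by
        simp only [pvStepA, pvNoMediaB] at hnm ⊢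
        rw [if_pos (by exact of_decide_eq_true hnm)]
        exact congrArg _ (pvBase_mod_nm n a b)
      rw [h1, ih]
      have hv : pvValidB p = false := by simp [pvValidB, hnm]
      have hc : pvVidCnt p = false := by simp [pvVidCnt, hnm]
      simp [hv, hc, hnm]
      congr 1; ring
    · by_cases hany : (((PySem.Dict.mk p).get? "media").getD []).any pvIsVideoA
      · have h1 : pvStepA (v, pvBase n a b) p = (v, pvBase n a (b + 1)) := by
          simp only [pvStepA, pvNoMediaB] at hnm ⊢
          rw [if_neg (by simpa using hnm), if_pos hany]
          exact congrArg _ (pvBase_mod_nv n a b)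
        rw [h1, ih]
        have hv : pvValidB p = false := by simp [pvValidB, pvIsVideoA] at hany ⊢; intro _; exact hany
        have hc : pvVidCnt p = true := by simp [pvVidCnt, hnm, hany]
        simp [hv, hc, hnm]
        congr 1; ring
      · have h1 : pvStepA (v, pvBase n a b) p = (v ++ [p], pvBase n a b) := by
          simp only [pvStepA, pvNoMediaB] at hnm ⊢
          rw [if_neg (by simpa using hnm), if_neg hany]
        rw [h1, ih]
        have hv : pvValidB p = true := by
          simp [pvValidB, pvIsVideoA] at hany ⊢; exact ⟨by simpa using hnm, hany⟩
        have hc : pvVidCnt p = false := by simp [pvVidCnt, hany]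
        simp [hv, hc, hnm]

lemma pvTri (posts : List (List (String × List (List (String × String))))) :
    (posts.map (fun p => if pvNoMediaB p then (1 : Int) else 0)).sum
      + (posts.map (fun p => if pvVidCnt p then (1 : Int) else 0)).sum
      + ((posts.filter pvValidB).length : Int) = (posts.length : Int) := by
  induction posts with
  | nil => simp
  | cons p ps ih =>
    simp only [List.map_cons, List.sum_cons, List.filter_cons, List.length_cons]
    by_cases hnm : pvNoMediaB p
    · have hv : pvValidB p = false := by simp [pvValidB, hnm]
      have hc : pvVidCnt p = false := by simp [pvVidCnt, hnm]
      simp [hnm, hv, hc]; omega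
    · by_cases hany : (((PySem.Dict.mk p).get? "media").getD []).any pvIsVideoA
      · have hv : pvValidB p = false := by
          simp [pvValidB, pvIsVideoA] at hany ⊢; intro _; exact hany
        have hc : pvVidCnt p = true := by simp [pvVidCnt, hnm, hany]
        simp [hnm, hv, hc]; omega
      · have hv : pvValidB p = true := by
          simp [pvValidB, pvIsVideoA] at hany ⊢; exact ⟨by simpa using hnm, hany⟩
        have hc : pvVidCnt p = false := by simp [pvVidCnt, hany]
        simp [hnm, hv, hc]; omega

-- ===== VERDICT (by name: the statement is the Claim_ definition above) =====
theorem filter_valid_posts_spec : Claim_equal_filter_valid_posts := by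
  intro posts _
  show filter_valid_posts posts = filter_valid_posts_alt posts
  have e1 : filter_valid_posts posts =
      ((posts.foldl pvStepA ([], pvBase (posts.length : Int) 0 0)).1,
       (posts.foldl pvStepA ([], pvBase (posts.length : Int) 0 0)).2.items) := rfl
  have e2 : filter_valid_posts_alt posts =
      (posts.filter pvValidB,
       [("original_count", (posts.length : Int)),
        ("excluded_no_media", (posts.map (fun p => if pvNoMediaB p then (1 : Int) else 0)).sum),
        ("excluded_video", (posts.length : Int)
          - (posts.map (fun p => if pvNoMediaB p then (1 : Int) else 0)).sum
          - ((posts.filter pvValidB).length : Int))]) := rfl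
  rw [e1, e2, pvLoopA]
  have h := pvTri posts
  have e3 : ∀ x y z : Int, (pvBase x y z).items =
      [("original_count", x), ("excluded_no_media", y), ("excluded_video", z)] :=
    fun _ _ _ => rfl
  simp only [e3, zero_add, List.nil_append, Prod.mk.injEq, List.cons.injEq, and_true, true_and]
  omega
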